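-- pv_equiv track=rewrite | github.com/eroge69/PyToExe | python-files/blackjack.py | update_count
-- ===== SOURCE A (Python) =====
-- def update_count(hand):
--     count = 0
--     for card in hand:
--         if card in ['2', '3', '4', '5', '6']:
--             count += 1
--         elif card in ['10', 'J', 'Q', 'K', 'A']:
--             count -= 1
--     return count
-- ===== SOURCE B (Python) =====
-- LOW = ('2', '3', '4', '5', '6')
-- HIGH = ('10', 'J', 'Q', 'K', 'A')
--
-- def update_count(hand):
--     # tally occurrences of each label once, instead of branching per card
--     return sum(map(hand.count, LOW)) - sum(map(hand.count, HIGH))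
-- ===== Notes on version B (the rewrite author's own statement) =====
-- stated objective: alternative
-- what changed: Replaces the single fused loop with per-card +1/-1 branching by label-directed counting: for each of the ten fixed labels, count its occurrences with list.count, then return the low-label total minus the high-label total.
import Mathlib
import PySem

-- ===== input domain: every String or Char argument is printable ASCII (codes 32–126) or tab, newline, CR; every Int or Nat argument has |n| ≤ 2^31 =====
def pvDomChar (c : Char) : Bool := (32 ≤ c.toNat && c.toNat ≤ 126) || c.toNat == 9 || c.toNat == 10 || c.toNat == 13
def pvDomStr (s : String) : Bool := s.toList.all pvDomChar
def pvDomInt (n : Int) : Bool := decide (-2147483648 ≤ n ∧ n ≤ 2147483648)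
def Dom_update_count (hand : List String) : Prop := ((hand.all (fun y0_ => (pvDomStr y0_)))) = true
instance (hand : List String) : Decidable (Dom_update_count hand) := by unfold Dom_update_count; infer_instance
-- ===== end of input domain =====

-- B replaces A's single branching loop by label-directed tallies: for each of the ten fixed
-- labels it counts occurrences with list.count, returning low total minus high total (objective: alternative, same cost).

-- ===== PORT A =====
def update_count (hand : List String) : Int :=
  hand.foldl (fun count card =>
    if card ∈ ["2", "3", "4", "5", "6"] then count + 1
    else if card ∈ ["10", "J", "Q", "K", "A"] then count - 1
    else count) 0

-- ===== PORT B =====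
def pvLow : List String := ["2", "3", "4", "5", "6"]
def pvHigh : List String := ["10", "J", "Q", "K", "A"]

def update_count_alt (hand : List String) : Int :=
  (pvLow.map (fun c => (PySem.List.count hand c : Int))).sum
  - (pvHigh.map (fun c => (PySem.List.count hand c : Int))).sum

-- ===== PRECONDITION & SPEC =====
def Spec_update_count (hand : List String) (out : Int) : Prop := out = update_count_alt hand
instance (hand : List String) (out : Int) : Decidable (Spec_update_count hand out) := by unfold Spec_update_count; infer_instance

-- ===== CLAIM (what is proved, stated in full; the proofs are below) =====
def Claim_equal_update_count : Prop := ∀ (hand : List String), Dom_update_count hand → Spec_update_count hand (update_count hand)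

-- ===== LEMMAS AND PROOFS =====

-- ===== VERDICT (by name: the statement is the Claim_ definition above) =====
-- per-card value assigned by A's branching
def pvVal (card : String) : Int :=
  if card ∈ ["2", "3", "4", "5", "6"] then 1
  else if card ∈ ["10", "J", "Q", "K", "A"] then -1
  else 0

theorem foldl_eq_sum_val (hand : List String) (a : Int) :
    hand.foldl (fun count card =>
      if card ∈ ["2", "3", "4", "5", "6"] then count + 1
      else if card ∈ ["10", "J", "Q", "K", "A"] then count - 1
      else count) a = a + (hand.map pvVal).sum := by
  induction hand generalizing a with
  | nil => simp
  | cons x xs ih =>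
    simp only [List.foldl_cons, List.map_cons, List.sum_cons, ih, pvVal]
    split_ifs <;> ring

-- the low and high label lists are disjoint, so A's two branches never overlap
theorem pvVal_eq_sub (x : String) :
    pvVal x = (if x ∈ ["2", "3", "4", "5", "6"] then (1 : Int) else 0)
      - (if x ∈ ["10", "J", "Q", "K", "A"] then (1 : Int) else 0) := by
  unfold pvVal
  split_ifs with h1 h2 h3 <;> simp_all <;> rcases h1 with h | h | h | h | h <;> subst h <;> simp_all

theorem ind_low (x : String) :
    (if x ∈ ["2", "3", "4", "5", "6"] then (1 : Int) else 0) =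
      (if x = "2" then (1 : Int) else 0) + ((if x = "3" then (1 : Int) else 0)
      + ((if x = "4" then (1 : Int) else 0) + ((if x = "5" then (1 : Int) else 0)
      + (if x = "6" then (1 : Int) else 0)))) := by
  by_cases h2 : x = "2" <;> by_cases h3 : x = "3" <;> by_cases h4 : x = "4" <;>
    by_cases h5 : x = "5" <;> by_cases h6 : x = "6" <;> subst_vars <;> simp_all

theorem ind_high (x : String) :
    (if x ∈ ["10", "J", "Q", "K", "A"] then (1 : Int) else 0) =
      (if x = "10" then (1 : Int) else 0) + ((if x = "J" then (1 : Int) else 0)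
      + ((if x = "Q" then (1 : Int) else 0) + ((if x = "K" then (1 : Int) else 0)
      + (if x = "A" then (1 : Int) else 0)))) := by
  by_cases h2 : x = "10" <;> by_cases h3 : x = "J" <;> by_cases h4 : x = "Q" <;>
    by_cases h5 : x = "K" <;> by_cases h6 : x = "A" <;> subst_vars <;> simp_all

theorem alt_eq_sum_val (hand : List String) :
    update_count_alt hand = (hand.map pvVal).sum := by
  induction hand with
  | nil => simp [update_count_alt, pvLow, pvHigh, PySem.List.count]
  | cons x xs ih =>
    simp only [update_count_alt, pvLow, pvHigh, PySem.List.count, List.map_cons,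
      List.map_nil, List.sum_cons, List.sum_nil, List.count_cons, beq_iff_eq] at ih ⊢
    rw [pvVal_eq_sub x, ind_low x, ind_high x]
    push_cast
    rw [← ih]
    ring

theorem update_count_spec : Claim_equal_update_count := by
  intro hand _
  unfold Spec_update_count update_count
  rw [foldl_eq_sum_val, alt_eq_sum_val]
  ring
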